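-- pv_equiv track=rewrite | github.com/harleyjwilson/note_split | src/note_split/note_manipulation.py | parse_input_text
-- ===== SOURCE A (Python) =====
-- DELIMITER = "==="
--
-- def parse_input_text(file_text):
--     output_files = {}
--     temp_note = []
--     in_split = False
--
--     for line in file_text:
--         if in_split:
--             if not line[0: len(DELIMITER)] == DELIMITER:
--                 temp_note.append(line)
--             else:
--                 in_split = False
--                 output_files.update({generate_filename(
--                     temp_note[0]): temp_note.copy()})
--                 temp_note.clear()
--         elif not in_split:
--             if line[0: len(DELIMITER)] == DELIMITER:
--                 in_split = True
--
--     return output_files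
--
-- def generate_filename(title):
--     filename = title.translate({ord(letter): None for letter in
--                                 '/:|"<>.,;=#[]'})
--     filename = filename.strip() + ".md"
--
--     return filename
-- ===== SOURCE B (Python) =====
-- DELIMITER = "==="
--
--
-- def generate_filename(title):
--     filename = title.translate({ord(letter): None for letter in
--                                 '/:|"<>.,;=#[]'})
--     return filename.strip() + ".md"
--
--
-- def parse_input_text(file_text):
--     # Phase 1: split the lines into the runs terminated by delimiter lines.
--     groups = []
--     cur = []
--     for line in file_text:
--         if line[0:len(DELIMITER)] == DELIMITER:
--             groups.append(cur)
--             cur = []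
--         else:
--             cur.append(line)
--     # `cur` is the trailing unterminated run and is dropped.
--     # Phase 2: the notes are exactly the odd-indexed terminated runs.
--     output_files = {}
--     for i, note in enumerate(groups):
--         if i % 2 == 1:
--             output_files[generate_filename(note[0])] = list(note)
--     return output_files
-- ===== Notes on version B (the rewrite author's own statement) =====
-- stated objective: alternative
-- what changed: Replaced A's single-pass in_split flag machine by a two-phase decomposition: first split the lines into delimiter-terminated runs, then build the dict from the odd-indexed runs via enumerate, dropping the trailing unterminated run.
import Mathlib
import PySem

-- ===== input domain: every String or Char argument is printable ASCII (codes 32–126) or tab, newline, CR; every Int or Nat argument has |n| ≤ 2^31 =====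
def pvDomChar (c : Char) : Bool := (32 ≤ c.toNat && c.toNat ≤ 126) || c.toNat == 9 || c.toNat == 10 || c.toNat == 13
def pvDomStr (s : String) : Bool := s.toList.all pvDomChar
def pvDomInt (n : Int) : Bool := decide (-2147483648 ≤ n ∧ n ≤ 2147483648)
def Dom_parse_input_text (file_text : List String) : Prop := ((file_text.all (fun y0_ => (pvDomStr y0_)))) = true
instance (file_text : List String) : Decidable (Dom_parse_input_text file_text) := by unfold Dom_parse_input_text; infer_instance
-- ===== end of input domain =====

-- B replaces A's in_split flag machine by a two-phase decomposition (split into delimiter-terminated runs,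
-- then keep the odd-indexed runs); same cost, objective: alternative decomposition.

-- DELIMITER = "==="
def pvDelim : String := "==="

-- line[0: len(DELIMITER)] == DELIMITER  (shared module-level test)
def pvIsDelim (line : String) : Bool :=
  PySem.Str.slice line (some 0) (some (PySem.Str.len pvDelim)) == pvDelim

-- generate_filename (module helper used by both sources)
def pvGenerateFilename (title : String) : String :=
  -- title.translate(delete '/:|"<>.,;=#[]')  — exact: deletes exactly those characters
  let filename := String.ofList (title.toList.filter (fun c => !("/:|\"<>.,;=#[]".toList.contains c)))
  PySem.Str.strip filename ++ ".md"

-- ===== PORT A =====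
-- temp_note[0] is PySem.List.pyGet?; none (Python IndexError) is excluded by Pre_ below, .getD "" is never read there
def parse_input_text (file_text : List String) : List (String × List String) :=
  let st := file_text.foldl
    (fun (st : PySem.Dict String (List String) × List String × Bool) line =>
      let output_files := st.1
      let temp_note := st.2.1
      let in_split := st.2.2
      if in_split then
        if !(pvIsDelim line) then
          (output_files, temp_note ++ [line], in_split)
        else
          (output_files.insert (pvGenerateFilename ((PySem.List.pyGet? temp_note 0).getD "")) temp_note,
           [], false)
      else
        if !in_split then
          if pvIsDelim line then (output_files, temp_note, true)
          else (output_files, temp_note, in_split)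
        else (output_files, temp_note, in_split))
    (PySem.Dict.empty, [], false)
  st.1.items

-- ===== PORT B =====
def parse_input_text_alt (file_text : List String) : List (String × List String) :=
  -- Phase 1: split into delimiter-terminated runs (st.1 = groups, st.2 = cur)
  let st := file_text.foldl
    (fun (st : List (List String) × List String) line =>
      if pvIsDelim line then (st.1 ++ [st.2], [])
      else (st.1, st.2 ++ [line]))
    ([], [])
  let groups := st.1
  -- Phase 2: notes are the odd-indexed runs
  let output_files := (PySem.List.enumerate groups).foldl
    (fun (output_files : PySem.Dict String (List String)) p =>
      if PySem.Int.mod p.1 2 == 1 then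
        output_files.insert (pvGenerateFilename ((PySem.List.pyGet? p.2 0).getD "")) p.2
      else output_files)
    PySem.Dict.empty
  output_files.items

-- ===== PRECONDITION & SPEC =====
-- Pre_ excludes exactly the inputs on which the Python A raises IndexError (temp_note[0] on an empty note:
-- two adjacent delimiter lines whose first one OPENS a note, i.e. an even number of delimiter lines precede it).
def Pre_parse_input_text (file_text : List String) : Prop :=
  ∀ i < file_text.length, i + 1 < file_text.length →
    pvIsDelim file_text[i]! = true → pvIsDelim file_text[i + 1]! = true →
    (file_text.take i).countP pvIsDelim % 2 = 1

instance (file_text : List String) : Decidable (Pre_parse_input_text file_text) := by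
  unfold Pre_parse_input_text; infer_instance

def pvWitness_parse_input_text : List String := ["===", "Title: one", "body line", "===", "tail"]

def Spec_parse_input_text (file_text : List String) (out : List (String × List String)) : Prop := out = parse_input_text_alt file_text
instance (file_text : List String) (out : List (String × List String)) : Decidable (Spec_parse_input_text file_text out) := by unfold Spec_parse_input_text; infer_instance

-- ===== CLAIM (what is proved, stated in full; the proofs are below) =====
def Claim_equal_parse_input_text : Prop := ∀ (file_text : List String), Dom_parse_input_text file_text → Pre_parse_input_text file_text → Spec_parse_input_text file_text (parse_input_text file_text)

-- ===== LEMMAS AND PROOFS =====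

-- B's phase-2 fold, with an arbitrary group list (proof abbreviation)
def pvNotes (groups : List (List String)) : PySem.Dict String (List String) :=
  (PySem.List.enumerate groups).foldl
    (fun (output_files : PySem.Dict String (List String)) p =>
      if PySem.Int.mod p.1 2 == 1 then
        output_files.insert (pvGenerateFilename ((PySem.List.pyGet? p.2 0).getD "")) p.2
      else output_files)
    PySem.Dict.empty

lemma pvNotes_append (done : List (List String)) (x : List String) :
    pvNotes (done ++ [x]) =
      if done.length % 2 = 1 then
        (pvNotes done).insert (pvGenerateFilename ((PySem.List.pyGet? x 0).getD "")) x
      else pvNotes done := by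
  unfold pvNotes
  rw [PySem.List.enumerate_append, List.foldl_append]
  rcases Nat.mod_two_eq_zero_or_one done.length with h | h <;>
    simp [PySem.List.enumerate_cons, PySem.List.enumerate_nil, h] <;>
    · intro hc; exfalso; omega

-- the invariant linking A's (dict, temp_note, in_split) to B's (groups, cur)
lemma pv_main (lines : List String) :
    ∀ (done : List (List String)) (cur : List String),
      (lines.foldl
        (fun (st : PySem.Dict String (List String) × List String × Bool) line =>
          let output_files := st.1
          let temp_note := st.2.1
          let in_split := st.2.2
          if in_split then
            if !(pvIsDelim line) then
              (output_files, temp_note ++ [line], in_split)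
            else
              (output_files.insert (pvGenerateFilename ((PySem.List.pyGet? temp_note 0).getD "")) temp_note,
               [], false)
          else
            if !in_split then
              if pvIsDelim line then (output_files, temp_note, true)
              else (output_files, temp_note, in_split)
            else (output_files, temp_note, in_split))
        (pvNotes done, (if done.length % 2 = 1 then cur else []), decide (done.length % 2 = 1))).1
      =
      pvNotes ((lines.foldl
        (fun (st : List (List String) × List String) line =>
          if pvIsDelim line then (st.1 ++ [st.2], [])
          else (st.1, st.2 ++ [line]))
        (done, cur)).1) := by
  induction lines with
  | nil => intro done cur; rfl
  | cons line rest ih =>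
    intro done cur
    simp only [List.foldl_cons]
    rcases Nat.mod_two_eq_zero_or_one done.length with hp | hp <;>
      by_cases hd : pvIsDelim line = true
    · have e := ih (done ++ [cur]) []
      simp [pvNotes_append, hp, hd, Nat.add_mod] at e ⊢
      exact e
    · have e := ih done (cur ++ [line])
      simp [hp, hd] at e ⊢
      exact e
    · have e := ih (done ++ [cur]) []
      simp [pvNotes_append, hp, hd, Nat.add_mod] at e ⊢
      exact e
    · have e := ih done (cur ++ [line])
      simp [hp, hd] at e ⊢
      exact e

-- ===== VERDICT (by name: the statement is the Claim_ definition above) =====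
theorem parse_input_text_spec : Claim_equal_parse_input_text := by
  intro file_text _ _
  unfold Spec_parse_input_text parse_input_text parse_input_text_alt
  have := pv_main file_text [] []
  simpa [pvNotes] using congrArg PySem.Dict.items this
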